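-- pv_equiv track=rewrite | github.com/chamsslash/ege_Informatics | 24/buffer/дз/2.py | zerkala
-- ===== SOURCE A (Python) =====
-- def zerkala(n):
--     palids=[]
--     for i in range(len(n)-1):
--         for j in range(i+1,len(n)):
--             o1=n[i:j+1]
--             if (o1==o1[::-1] ) and ((len(o1)%2)!=0) and ((int(o1[len(o1)//2],25)%2)==0) and o1!='0':
--                 palids.append(o1)
--     if len(palids)>0:
--         return max(palids,key=len)
--     return ''
-- ===== SOURCE B (Python) =====
-- def zerkala(n):
--     # Expand-around-center: longest odd-length (>=3) palindromic substring whose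
--     # middle character is an even base-25 digit ("02468acegikmo", case-insensitive);
--     # first (leftmost) such substring wins on ties, '' if none.
--     best = ''
--     for c in range(1, len(n) - 1):
--         if n[c].lower() in "02468acegikmo":
--             r = 0
--             while c - r - 1 >= 0 and c + r + 1 < len(n) and n[c - r - 1] == n[c + r + 1]:
--                 r += 1
--             if r > 0 and 2 * r + 1 > len(best):
--                 best = n[c - r:c + r + 1]
--     return best
-- ===== Notes on version B (the rewrite author's own statement) =====
-- stated objective: faster
-- what changed: A enumerates all O(n^2) substrings, slices and reverses each to test palindromicity and collects them before a final max(key=len); B expands around each center once, keeps only the running best, and tests the middle character against the precomputed set of even base-25 digits.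
import Mathlib
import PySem

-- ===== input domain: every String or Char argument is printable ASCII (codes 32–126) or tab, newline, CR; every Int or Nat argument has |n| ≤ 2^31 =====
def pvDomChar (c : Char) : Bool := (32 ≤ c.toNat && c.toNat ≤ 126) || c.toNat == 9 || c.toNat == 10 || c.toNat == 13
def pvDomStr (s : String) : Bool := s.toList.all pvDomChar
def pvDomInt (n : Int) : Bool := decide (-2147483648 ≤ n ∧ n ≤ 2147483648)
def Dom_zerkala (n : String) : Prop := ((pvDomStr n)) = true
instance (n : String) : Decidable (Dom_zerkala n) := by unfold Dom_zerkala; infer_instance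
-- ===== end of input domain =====

-- B replaces A's enumerate-all-substrings-then-max(key=len) with a single expand-around-center
-- pass keeping a running best (same value, including first-longest tie-breaking, on all of Pre_).

-- ===== PORT A =====
-- the test 'int(o1[len(o1)//2], 25) % 2 == 0' of A's condition; len(o1)//2 and len(o1)%2 are
-- Python // and % on the nonnegative length, identical to Nat / and % here.
-- 'none' of PySem.Int.ofCharsBase? is exactly where Python's int raises ValueError; those
-- inputs are excluded by Pre_zerkala, so the 'false' taken here is never reached inside Pre_.
def zerkalaMid (o1 : List Char) : Bool :=
  match PySem.List.pyGet? o1 ((o1.length / 2 : Nat) : Int) with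
  | some c =>
    match PySem.Int.ofCharsBase? [c] 25 with
    | some v => PySem.Int.mod v 2 == 0
    | none => false
  | none => false

-- A's if-condition on the slice o1 (o1[::-1] is List.reverse, PySem.List.slice?_none_none_neg_one)
def zerkalaCond (o1 : List Char) : Bool :=
  (o1 == o1.reverse) && (o1.length % 2 != 0) && zerkalaMid o1 && (o1 != ['0'])

def zerkala (n : String) : String :=
  let s := n.toList
  let palids : List (List Char) :=
    (PySem.List.pyRange 0 ((s.length : Int) - 1) 1).foldl (fun acc i =>
      (PySem.List.pyRange (i + 1) (s.length : Int) 1).foldl (fun acc2 j =>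
        if zerkalaCond (PySem.List.slice s (some i) (some (j + 1))) then
          acc2 ++ [PySem.List.slice s (some i) (some (j + 1))]
        else acc2) acc) []
  if palids.length > 0 then
    match PySem.List.max? palids (fun y => y.length) with    -- max(palids, key=len)
    | some m => String.ofList m
    | none => ""                                             -- unreachable: palids ≠ []
  else ""

-- ===== PORT B =====
-- B's while loop: expand the radius r around center c while the flanking characters match
def zerkalaExpand (s : List Char) (c : Nat) (r : Nat) : Nat :=
  if h : r + 1 ≤ c ∧ c + r + 1 < s.length ∧ s[c - r - 1]? = s[c + r + 1]? then
    zerkalaExpand s c (r + 1)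
  else r
termination_by s.length - r
decreasing_by omega

def zerkala_alt (n : String) : String :=
  let s := n.toList
  let best : List Char :=
    (PySem.List.pyRange 1 ((s.length : Int) - 1) 1).foldl (fun best c =>
      -- n[c].lower() in "02468acegikmo"  (c is in range, so pyGetD's default is never taken)
      if PySem.Chars.isIn (PySem.Chars.lower [PySem.List.pyGetD s c ' ']) "02468acegikmo".toList then
        let r := zerkalaExpand s c.toNat 0
        if 0 < r ∧ best.length < 2 * r + 1 then
          PySem.List.slice s (some (c - (r : Int))) (some (c + (r : Int) + 1))
        else best
      else best) []
  String.ofList best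

-- ===== PRECONDITION & SPEC =====
-- Pre_zerkala excludes exactly the inputs on which Python A raises ValueError: A calls
-- int(·, 25) on the middle character of every odd palindromic substring of length ≥ 3, and such
-- a substring with a non-base-25-digit middle exists iff some c has s[c-1] = s[c+1] while s[c]
-- is not a base-25 digit.
def Pre_zerkala (n : String) : Prop :=
  ∀ c, c < n.toList.length →
    (1 ≤ c → c + 1 < n.toList.length → n.toList[c-1]? = n.toList[c+1]? →
      (PySem.Int.ofCharsBase? [n.toList.getD c ' '] 25).isSome)
instance (n : String) : Decidable (Pre_zerkala n) := by unfold Pre_zerkala; infer_instance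
def pvWitness_zerkala : String := "abacaba"

def Spec_zerkala (n : String) (out : String) : Prop := out = zerkala_alt n
instance (n : String) (out : String) : Decidable (Spec_zerkala n out) := by unfold Spec_zerkala; infer_instance

-- ===== CLAIM (what is proved, stated in full; the proofs are below) =====
def Claim_equal_zerkala : Prop := ∀ (n : String), Dom_zerkala n → Pre_zerkala n → Spec_zerkala n (zerkala n)

-- ===== LEMMAS AND PROOFS =====

-- B's membership test n[c].lower() in "02468acegikmo" (the base-25 digits of even value)
def evenMid (ch : Char) : Bool :=
  PySem.Chars.isIn (PySem.Chars.lower [ch]) "02468acegikmo".toList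

-- A's test int(ch, 25) % 2 == 0 (false where int raises): A's zerkalaMid on the 1-char window
def evenA (ch : Char) : Bool := zerkalaMid [ch]

set_option maxHeartbeats 1000000 in
lemma evenA_eq_evenMid (ch : Char) (h : pvDomChar ch = true) : evenA ch = evenMid ch := by
  have key : ∀ m : Nat, m < 127 → evenA (Char.ofNat m) = evenMid (Char.ofNat m) := by decide
  have hlt : ch.toNat < 127 := by
    unfold pvDomChar at h
    simp only [Bool.or_eq_true, Bool.and_eq_true, decide_eq_true_eq, beq_iff_eq] at h
    omega
  have := key ch.toNat hlt
  rwa [Char.ofNat_toNat] at this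

-- canonical center data (defined from B's loop; used only by the proofs below)
def rmax (s : List Char) (c : Nat) : Nat := zerkalaExpand s c 0
def valC (s : List Char) (c : Nat) : Nat :=
  if evenMid (s.getD c ' ') && decide (0 < rmax s c) then 2 * rmax s c + 1 else 0
def candC (s : List Char) (c : Nat) : List Char :=
  (s.drop (c - rmax s c)).take (2 * rmax s c + 1)
def ctrs (s : List Char) : List Nat := List.range' 1 (s.length - 2)
def maxV (s : List Char) : Nat := (ctrs s).foldl (fun a c => max a (valC s c)) 0
-- the common value of both programs
def tgt (s : List Char) : List Char :=
  if maxV s = 0 then []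
  else match (ctrs s).find? (fun c => maxV s ≤ valC s c) with
       | some c => candC s c
       | none => []

def econd (s : List Char) (c t : Nat) : Prop :=
  t + 1 ≤ c ∧ c + t + 1 < s.length ∧ s[c - t - 1]? = s[c + t + 1]?

theorem expand_ge (s : List Char) (c r : Nat) : r ≤ zerkalaExpand s c r := by
  rw [zerkalaExpand]
  split
  next h => exact le_trans (Nat.le_succ r) (expand_ge s c (r + 1))
  next h => exact le_refl r
termination_by s.length - r
decreasing_by omega

theorem expand_stop (s : List Char) (c r : Nat) : ¬ econd s c (zerkalaExpand s c r) := by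
  rw [zerkalaExpand]
  split
  next h => exact expand_stop s c (r + 1)
  next h => exact h
termination_by s.length - r
decreasing_by omega

theorem expand_sound (s : List Char) (c r : Nat) :
    ∀ t, r ≤ t → t < zerkalaExpand s c r → econd s c t := by
  rw [zerkalaExpand]
  split
  next h =>
    intro t h1 h2
    rcases Nat.eq_or_lt_of_le h1 with rfl | h1'
    · exact h
    · exact expand_sound s c (r + 1) t h1' h2
  next h => intro t h1 h2; omega
termination_by s.length - r
decreasing_by omega

theorem expand_max (s : List Char) (c r' : Nat) (h : ∀ t, t < r' → econd s c t) :
    r' ≤ rmax s c := by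
  by_contra hc
  rw [Nat.not_le] at hc
  exact expand_stop s c 0 (h _ hc)

-- palindromicity of the odd window around a center is flank-matching
lemma win_length (s : List Char) (c r : Nat) (h1 : r ≤ c) (h2 : c + r < s.length) :
    ((s.drop (c - r)).take (2 * r + 1)).length = 2 * r + 1 := by
  simp [List.length_take, List.length_drop]; omega

lemma pal_iff (s : List Char) (c r : Nat) (h1 : r ≤ c) (h2 : c + r < s.length) :
    ((s.drop (c - r)).take (2 * r + 1) = ((s.drop (c - r)).take (2 * r + 1)).reverse)
    ↔ (∀ u, 1 ≤ u → u ≤ r → s[c - u]? = s[c + u]?) := by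
  set w := (s.drop (c - r)).take (2 * r + 1) with hw
  have hlen : w.length = 2 * r + 1 := win_length s c r h1 h2
  have hget : ∀ k, w[k]? = if k < 2 * r + 1 then s[c - r + k]? else none := by
    intro k
    rw [hw, List.getElem?_take, List.getElem?_drop]
  constructor
  · intro hp u hu1 hu2
    have e1 : w[r - u]? = s[c - u]? := by
      rw [hget, if_pos (by omega)]
      congr 1; omega
    have e2 : w.reverse[r - u]? = s[c + u]? := by
      rw [List.getElem?_reverse (by omega), hlen, hget, if_pos (by omega)]
      congr 1; omega
    rw [← e1, ← e2, ← hp]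
  · intro hm
    apply List.ext_getElem?
    intro k
    by_cases hk : k < 2 * r + 1
    · rw [List.getElem?_reverse (by omega), hlen, hget, hget, if_pos hk, if_pos (by omega)]
      rcases lt_trichotomy k r with hlt | heq | hgt
      · have := hm (r - k) (by omega) (by omega)
        have e1 : c - r + k = c - (r - k) := by omega
        have e2 : c - r + (2 * r + 1 - 1 - k) = c + (r - k) := by omega
        rw [e1, e2]; exact this
      · subst heq
        congr 1; omega
      · have := hm (k - r) (by omega) (by omega)
        have e1 : c - r + k = c + (k - r) := by omega
        have e2 : c - r + (2 * r + 1 - 1 - k) = c - (k - r) := by omega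
        rw [e1, e2]; exact this.symm
    · rw [List.getElem?_eq_none (by omega), List.getElem?_eq_none (by simp [hlen]; omega)]

-- A's boolean condition on the window [i, j], characterised through centers
def Qn (s : List Char) (i j : Nat) : Bool := zerkalaCond ((s.drop i).take (j + 1 - i))

lemma window_len (s : List Char) (i j : Nat) (_hij : i < j) (hj : j < s.length) :
    ((s.drop i).take (j + 1 - i)).length = j + 1 - i := by
  simp [List.length_take, List.length_drop]; omega

lemma zerkalaMid_eq (s : List Char) (i j r : Nat) (hij : i < j) (hj : j < s.length)
    (hjr : j = i + 2 * r) :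
    zerkalaMid ((s.drop i).take (j + 1 - i)) = evenA (s.getD (i + r) ' ') := by
  have hidx : ((s.drop i).take (j + 1 - i))[(j + 1 - i) / 2]? = some (s.getD (i + r) ' ') := by
    rw [List.getElem?_take, if_pos (by omega), List.getElem?_drop,
      show i + (j + 1 - i) / 2 = i + r by omega, List.getElem?_eq_getElem (by omega)]
    congr 1
    exact (List.getD_eq_getElem s ' ' (by omega)).symm
  rw [zerkalaMid, window_len s i j hij hj, PySem.List.pyGet?_natCast, hidx, evenA, zerkalaMid]
  simp

lemma cond_iff (s : List Char) (hdom : ∀ ch ∈ s, pvDomChar ch = true)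
    (i j : Nat) (hij : i < j) (hj : j < s.length) :
    Qn s i j = true ↔
      ∃ r, 1 ≤ r ∧ j = i + 2 * r ∧
        (∀ u, 1 ≤ u → u ≤ r → s[i + r - u]? = s[i + r + u]?) ∧
        evenMid (s.getD (i + r) ' ') = true := by
  have hmem : ∀ r, j = i + 2 * r → s.getD (i + r) ' ' ∈ s := by
    intro r hr
    rw [List.getD_eq_getElem s ' ' (by omega)]
    exact List.getElem_mem _
  constructor
  · intro hQ
    simp only [Qn, zerkalaCond, Bool.and_eq_true, beq_iff_eq, bne_iff_ne, ne_eq] at hQ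
    obtain ⟨⟨⟨hpal, hodd⟩, hmid⟩, hne⟩ := hQ
    rw [window_len s i j hij hj] at hodd
    have hr1 : 1 ≤ (j - i) / 2 := by omega
    have hjr : j = i + 2 * ((j - i) / 2) := by omega
    refine ⟨(j - i) / 2, hr1, hjr, ?_, ?_⟩
    · set r := (j - i) / 2
      have hwin : (s.drop i).take (j + 1 - i) = (s.drop (i + r - r)).take (2 * r + 1) := by
        congr 2 <;> omega
      rw [hwin] at hpal
      exact (pal_iff s (i + r) r (by omega) (by omega)).mp hpal
    · rw [zerkalaMid_eq s i j _ hij hj hjr] at hmid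
      rw [← evenA_eq_evenMid _ (hdom _ (hmem _ hjr))]
      exact hmid
  · rintro ⟨r, hr1, hjr, hmat, hev⟩
    simp only [Qn, zerkalaCond, Bool.and_eq_true, beq_iff_eq, bne_iff_ne, ne_eq]
    refine ⟨⟨⟨?_, ?_⟩, ?_⟩, ?_⟩
    · have hwin : (s.drop i).take (j + 1 - i) = (s.drop (i + r - r)).take (2 * r + 1) := by
        congr 2 <;> omega
      rw [hwin]
      exact (pal_iff s (i + r) r (by omega) (by omega)).mpr hmat
    · rw [window_len s i j hij hj]; omega
    · rw [zerkalaMid_eq s i j r hij hj hjr, evenA_eq_evenMid _ (hdom _ (hmem _ hjr))]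
      exact hev
    · intro hbad
      have := congrArg List.length hbad
      rw [window_len s i j hij hj] at this
      simp at this
      omega

lemma val_ge_of_Q (s : List Char) (hdom : ∀ ch ∈ s, pvDomChar ch = true)
    (i j : Nat) (hij : i < j) (hj : j < s.length) (hQ : Qn s i j = true) :
    ∃ r, 1 ≤ r ∧ j = i + 2 * r ∧ (i + r) ∈ ctrs s ∧ j + 1 - i ≤ valC s (i + r) := by
  obtain ⟨r, hr1, hjr, hmat, hev⟩ := (cond_iff s hdom i j hij hj).mp hQ
  have hrm : r ≤ rmax s (i + r) := by
    apply expand_max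
    intro t ht
    refine ⟨by omega, by omega, ?_⟩
    have := hmat (t + 1) (by omega) (by omega)
    rw [show i + r - t - 1 = i + r - (t + 1) by omega, show i + r + t + 1 = i + r + (t + 1) by omega]
    exact this
  refine ⟨r, hr1, hjr, ?_, ?_⟩
  · rw [ctrs, List.mem_range'_1]
    omega
  · rw [valC, if_pos (by rw [hev]; simp; omega)]
    omega

lemma val_pos_elim (s : List Char) (c : Nat) (hv : 0 < valC s c) :
    1 ≤ rmax s c ∧ rmax s c ≤ c ∧ c + rmax s c < s.length ∧ valC s c = 2 * rmax s c + 1 ∧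
      evenMid (s.getD c ' ') = true := by
  have hrfl : rmax s c = zerkalaExpand s c 0 := rfl
  by_cases hcond : (evenMid (s.getD c ' ') && decide (0 < rmax s c)) = true
  · have hcond' := hcond
    simp only [Bool.and_eq_true, decide_eq_true_eq] at hcond'
    obtain ⟨hev, hr⟩ := hcond'
    have he := expand_sound s c 0 (rmax s c - 1) (by omega) (by omega)
    obtain ⟨h1, h2, _⟩ := he
    exact ⟨hr, by omega, by omega, by rw [valC, if_pos hcond], hev⟩
  · rw [valC, if_neg hcond] at hv
    omega

lemma Q_at_val (s : List Char) (hdom : ∀ ch ∈ s, pvDomChar ch = true)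
    (c : Nat) (hv : 0 < valC s c) :
    Qn s (c - rmax s c) (c + rmax s c) = true := by
  obtain ⟨hr, hrc, hcr, hval, hev⟩ := val_pos_elim s c hv
  have hrfl : rmax s c = zerkalaExpand s c 0 := rfl
  apply (cond_iff s hdom _ _ (by omega) (by omega)).mpr
  refine ⟨rmax s c, hr, by omega, ?_, ?_⟩
  · intro u hu1 hu2
    have := expand_sound s c 0 (u - 1) (by omega) (by omega)
    obtain ⟨_, _, h3⟩ := this
    rw [show c - rmax s c + rmax s c - u = c - (u - 1) - 1 by omega,
      show c - rmax s c + rmax s c + u = c + (u - 1) + 1 by omega]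
    exact h3
  · rw [show c - rmax s c + rmax s c = c by omega]
    exact hev

-- generic first-strict-improvement fold (shared shape of B's loop and of Python's max(key=len))
lemma pickG1 {α β : Type} (v : α → Nat) (gc : α → β) (m : β → Nat) :
    ∀ (l : List α) (b : β), (∀ a ∈ l, v a ≤ m b) →
      l.foldl (fun acc a => if m acc < v a then gc a else acc) b = b := by
  intro l
  induction l with
  | nil => intro b _; rfl
  | cons x t ih =>
    intro b hb
    have hx : v x ≤ m b := hb x (List.mem_cons_self)
    rw [List.foldl_cons]
    have hxe : (if m b < v x then gc x else b) = b := if_neg (by omega)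
    rw [hxe]
    exact ih b (fun a ha => hb a (List.mem_cons_of_mem _ ha))

lemma pickG2 {α β : Type} (v : α → Nat) (gc : α → β) (m : β → Nat) (M : Nat) :
    ∀ (l : List α) (b : β) (a₀ : α),
      (∀ a ∈ l, v a ≤ M) → (∀ a ∈ l, 0 < v a → m (gc a) = v a) → m b < M →
      l.find? (fun a => M ≤ v a) = some a₀ →
      l.foldl (fun acc a => if m acc < v a then gc a else acc) b = gc a₀ := by
  intro l
  induction l with
  | nil => intro b a₀ _ _ _ hf; simp at hf
  | cons x t ih =>
    intro b a₀ hM hg hb hf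
    by_cases hMx : M ≤ v x
    · have hx0 : x = a₀ := by
        rw [List.find?_cons_of_pos (by simpa using hMx)] at hf
        exact Option.some.inj hf
      subst hx0
      have hvx : v x = M := le_antisymm (hM x List.mem_cons_self) hMx
      have hcond : m b < v x := by omega
      rw [List.foldl_cons]
      have hxe : (if m b < v x then gc x else b) = gc x := if_pos hcond
      rw [hxe]
      exact pickG1 v gc m t (gc x) (fun a ha => by
        rw [hg x List.mem_cons_self (by omega)]; exact le_trans (hM a (List.mem_cons_of_mem _ ha)) (by omega))
    · rw [List.find?_cons_of_neg (by simpa using hMx)] at hf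
      by_cases hcond : m b < v x
      · rw [List.foldl_cons]
        have hxe : (if m b < v x then gc x else b) = gc x := if_pos hcond
        rw [hxe]
        exact ih (gc x) a₀ (fun a ha => hM a (List.mem_cons_of_mem _ ha))
          (fun a ha => hg a (List.mem_cons_of_mem _ ha))
          (by rw [hg x List.mem_cons_self (by omega)]; omega) hf
      · rw [List.foldl_cons]
        have hxe : (if m b < v x then gc x else b) = b := if_neg hcond
        rw [hxe]
        exact ih b a₀ (fun a ha => hM a (List.mem_cons_of_mem _ ha))
          (fun a ha => hg a (List.mem_cons_of_mem _ ha)) hb hf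

-- Python's max(key=len) as the same fold
lemma max?_cons_foldl (t : List (List Char)) : ∀ x, PySem.List.max? (x :: t) (fun y => y.length) =
      some (t.foldl (fun b y => if b.length < y.length then y else b) x) := by
  induction t with
  | nil => intro x; rfl
  | cons y t ih =>
    intro x
    have h1 : PySem.List.max? (x :: y :: t) (fun s => s.length) =
        PySem.List.max? ((if x.length < y.length then y else x) :: t) (fun s => s.length) := by
      rw [PySem.List.max?, PySem.List.max?, List.foldl_cons, List.foldl_cons, List.foldl_cons]
      congr 1
      by_cases h : x.length < y.length <;> simp [h]
    rw [h1, ih, List.foldl_cons]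

lemma max?_eq_first (l : List (List Char)) (M : Nat) (y₀ : List Char)
    (hM : ∀ y ∈ l, y.length ≤ M) (_h0 : 0 < M)
    (hf : l.find? (fun y => M ≤ y.length) = some y₀) :
    PySem.List.max? l (fun y => y.length) = some y₀ := by
  cases l with
  | nil => simp at hf
  | cons z t =>
    rw [max?_cons_foldl]
    by_cases hz : M ≤ z.length
    · rw [List.find?_cons_of_pos (by simpa using hz)] at hf
      have hy : z = y₀ := Option.some.inj hf
      subst hy
      have hzM : z.length = M := le_antisymm (hM z List.mem_cons_self) hz
      have hb : ∀ a ∈ t, (fun y : List Char => y.length) a ≤ (fun y : List Char => y.length) z := by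
        intro a ha
        show a.length ≤ z.length
        rw [hzM]
        exact hM a (List.mem_cons_of_mem _ ha)
      have := pickG1 (fun y : List Char => y.length) (fun y => y) (fun y : List Char => y.length) t z hb
      simpa using this
    · rw [List.find?_cons_of_neg (by simpa using hz)] at hf
      have hb : ∀ a ∈ t, (fun y : List Char => y.length) a ≤ M :=
        fun a ha => hM a (List.mem_cons_of_mem _ ha)
      have hzM : (fun y : List Char => y.length) z < M := by
        show z.length < M; omega
      have := pickG2 (fun y : List Char => y.length) (fun y => y) (fun y : List Char => y.length) M t z y₀
        hb (fun a _ _ => rfl) hzM hf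
      simpa using this

-- range' find? helpers
lemma find?_range'_eq (q : Nat → Bool) (a n j₀ : Nat) (h1 : a ≤ j₀) (h2 : j₀ < a + n)
    (hb : ∀ j, a ≤ j → j < j₀ → q j = false) (hq : q j₀ = true) :
    (List.range' a n).find? q = some j₀ := by
  induction n generalizing a with
  | zero => omega
  | succ n ih =>
    rw [List.range'_succ]
    by_cases ha : a = j₀
    · subst ha; rw [List.find?_cons_of_pos hq]
    · rw [List.find?_cons_of_neg (by rw [hb a le_rfl (by omega)]; simp)]
      exact ih (a + 1) (by omega) (by omega) (fun j hj1 hj2 => hb j (by omega) hj2)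

lemma find?_flatMap_range' {β : Type} (g : Nat → List β) (p : β → Bool)
    (a n i₀ : Nat) (y : β) (h1 : a ≤ i₀) (h2 : i₀ < a + n)
    (hb : ∀ i, a ≤ i → i < i₀ → (g i).find? p = none)
    (hi : (g i₀).find? p = some y) :
    ((List.range' a n).flatMap g).find? p = some y := by
  induction n generalizing a with
  | zero => omega
  | succ n ih =>
    rw [List.range'_succ, List.flatMap_cons, List.find?_append]
    by_cases ha : a = i₀
    · subst ha; rw [hi]; rfl
    · rw [hb a le_rfl (by omega)]
      exact ih (a + 1) (by omega) (by omega) (fun i hi1 hi2 => hb i (by omega) hi2)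

-- A's collected list, in spec form
def Aspec (s : List Char) : List (List Char) :=
  (List.range' 0 (s.length - 1)).flatMap (fun i =>
    ((List.range' (i + 1) (s.length - (i + 1))).filter (fun j => Qn s i j)).map
      (fun j => (s.drop i).take (j + 1 - i)))

lemma Afold_eq (s : List Char) :
    ((PySem.List.pyRange 0 ((s.length : Int) - 1) 1).foldl (fun acc i =>
      (PySem.List.pyRange (i + 1) (s.length : Int) 1).foldl (fun acc2 j =>
        if zerkalaCond (PySem.List.slice s (some i) (some (j + 1))) then
          acc2 ++ [PySem.List.slice s (some i) (some (j + 1))]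
        else acc2) acc) ([] : List (List Char))) = Aspec s := by
  rw [PySem.List.foldl_congr_mem _ _ (fun acc i =>
      acc ++ ((PySem.List.pyRange (i + 1) (s.length : Int) 1).filter
          (fun j => zerkalaCond (PySem.List.slice s (some i) (some (j + 1))))).map
        (fun j => PySem.List.slice s (some i) (some (j + 1)))) _
    (fun acc i _ => PySem.List.foldl_append_if
      (fun j => zerkalaCond (PySem.List.slice s (some i) (some (j + 1))))
      (fun j => PySem.List.slice s (some i) (some (j + 1))) _ acc)]
  rw [PySem.List.foldl_append_eq_flatMap, List.nil_append]
  rw [Aspec]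
  simp only [PySem.List.pyRange_one, List.range'_eq_map_range, List.flatMap_map,
    List.filter_map, List.map_map]
  have hn : ((s.length : Int) - 1 - 0).toNat = s.length - 1 := by omega
  rw [hn]
  apply List.flatMap_congr
  intro k hk
  have hfun : ∀ (i j' : Nat), PySem.List.slice s (some ((0:Int) + ↑i)) (some ((0 + ↑i + 1 + ↑j') + 1)) =
      List.take ((0 + i + 1 + j') + 1 - (0 + i)) (List.drop (0 + i) s) := by
    intro i j'
    have e1 : ((0:Int) + ↑i) = ((i : Nat) : Int) := by omega
    have e2 : ((i:Int) + 1 + ↑j' + 1) = (((i + 1 + j' + 1 : Nat)) : Int) := by push_cast; ring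
    rw [e1, e2, PySem.List.slice_natCast]
    congr 1
    · omega
    · congr 1
      omega
  rw [show ((s.length : Int) - (0 + (k : Int) + 1)).toNat = s.length - (0 + k + 1) by omega]
  have hfil : List.filter ((fun j => zerkalaCond (PySem.List.slice s (some (0 + (k:Int))) (some (j + 1)))) ∘
        fun k_1 : Nat => 0 + (k:Int) + 1 + ↑k_1) (List.range (s.length - (0 + k + 1))) =
      List.filter ((fun j => Qn s (0 + k) j) ∘ fun x => 0 + k + 1 + x)
        (List.range (s.length - (0 + k + 1))) := by
    apply List.filter_congr
    intro x _
    simp only [Function.comp]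
    rw [hfun k x, Qn]
  rw [hfil]
  apply List.map_congr_left
  intro x hx
  simp only [Function.comp]
  rw [hfun k x]

lemma zerkala_eq_form (n : String) :
    zerkala n = (if (Aspec n.toList).length > 0 then
      match PySem.List.max? (Aspec n.toList) (fun y => y.length) with
      | some m => String.ofList m
      | none => ""
    else "") := by
  simp only [zerkala]
  rw [Afold_eq]

lemma mem_Aspec (s : List Char) (y : List Char) :
    y ∈ Aspec s ↔ ∃ i j, i < j ∧ j < s.length ∧ Qn s i j = true ∧ y = (s.drop i).take (j + 1 - i) := by
  simp only [Aspec, List.mem_flatMap, List.mem_map, List.mem_filter, List.mem_range'_1]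
  constructor
  · rintro ⟨i, ⟨hi0, hiN⟩, j, ⟨⟨hj1, hj2⟩, hQ⟩, rfl⟩
    exact ⟨i, j, by omega, by omega, hQ, rfl⟩
  · rintro ⟨i, j, hij, hjN, hQ, rfl⟩
    exact ⟨i, ⟨by omega, by omega⟩, j, ⟨⟨by omega, by omega⟩, hQ⟩, rfl⟩

lemma find?_range'_inv (q : Nat → Bool) (a n j₀ : Nat)
    (h : (List.range' a n).find? q = some j₀) :
    q j₀ = true ∧ a ≤ j₀ ∧ j₀ < a + n ∧ ∀ j, a ≤ j → j < j₀ → q j = false := by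
  induction n generalizing a with
  | zero => simp at h
  | succ n ih =>
    rw [List.range'_succ] at h
    cases hq : q a with
    | true =>
      rw [List.find?_cons_of_pos hq] at h
      obtain rfl : a = j₀ := Option.some.inj h
      exact ⟨hq, le_rfl, by omega, fun j h1 h2 => by omega⟩
    | false =>
      rw [List.find?_cons_of_neg (by simp [hq])] at h
      obtain ⟨h1, h2, h3, h4⟩ := ih (a + 1) h
      refine ⟨h1, by omega, by omega, ?_⟩
      intro j hj1 hj2
      rcases Nat.eq_or_lt_of_le hj1 with rfl | hlt
      · exact hq
      · exact h4 j hlt hj2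

lemma valC_out (s : List Char) (c : Nat) (h : c = 0 ∨ s.length ≤ c + 1) : valC s c = 0 := by
  by_contra hne
  obtain ⟨h1, h2, h3, _, _⟩ := val_pos_elim s c (Nat.pos_of_ne_zero hne)
  omega

lemma maxV_bound (s : List Char) (c : Nat) (hc : c ∈ ctrs s) : valC s c ≤ maxV s := by
  have := (PySem.List.le_foldl_max_nat (ctrs s) (valC s) 0).2 c hc
  exact this

lemma maxV_mem (s : List Char) : maxV s = 0 ∨ ∃ c ∈ ctrs s, valC s c = maxV s := by
  have h : maxV s = ((ctrs s).map (valC s)).foldl max 0 := by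
    rw [List.foldl_map]; rfl
  rcases PySem.List.foldl_max_mem ((ctrs s).map (valC s)) 0 with h0 | hmem
  · left; rw [h, h0]
  · right
    rw [← h] at hmem
    obtain ⟨c, hc, hv⟩ := List.mem_map.mp hmem
    exact ⟨c, hc, hv⟩

lemma A_eq_tgt (n : String) (hdom : ∀ ch ∈ n.toList, pvDomChar ch = true) :
    zerkala n = String.ofList (tgt n.toList) := by
  rw [zerkala_eq_form]
  set s := n.toList with hs
  have hbound : ∀ y ∈ Aspec s, y.length ≤ maxV s := by
    intro y hy
    obtain ⟨i, j, hij, hjN, hQ, rfl⟩ := (mem_Aspec s y).mp hy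
    obtain ⟨r, hr1, hjr, hcm, hval⟩ := val_ge_of_Q s hdom i j hij hjN hQ
    have := maxV_bound s (i + r) hcm
    rw [window_len s i j hij hjN]
    omega
  by_cases hM : maxV s = 0
  · have hempty : Aspec s = [] := by
      rw [List.eq_nil_iff_forall_not_mem]
      intro y hy
      obtain ⟨i, j, hij, hjN, hQ, hy'⟩ := (mem_Aspec s y).mp hy
      obtain ⟨r, hr1, hjr, hcm, hval⟩ := val_ge_of_Q s hdom i j hij hjN hQ
      have := maxV_bound s (i + r) hcm
      omega
    rw [hempty, tgt, if_pos hM]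
    simp
  · have hMpos : 0 < maxV s := Nat.pos_of_ne_zero hM
    have hex : ∃ c ∈ ctrs s, (fun c => decide (maxV s ≤ valC s c)) c = true := by
      rcases maxV_mem s with h0 | ⟨c, hc, hv⟩
      · omega
      · exact ⟨c, hc, by simp [hv]⟩
    obtain ⟨cstar, hfind⟩ := Option.isSome_iff_exists.mp (List.find?_isSome.mpr hex)
    have hfind' := hfind
    rw [ctrs] at hfind'
    obtain ⟨hq, hc1, hc2, hmin⟩ := find?_range'_inv _ _ _ _ hfind'
    have hqs : maxV s ≤ valC s cstar := of_decide_eq_true hq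
    have hmemc : cstar ∈ ctrs s := List.mem_of_find?_eq_some hfind
    have hvstar : valC s cstar = maxV s := le_antisymm (maxV_bound s cstar hmemc) hqs
    obtain ⟨hrpos, hrc, hcr, hveq, hev⟩ := val_pos_elim s cstar (by omega)
    have hminv : ∀ c, c < cstar → valC s c < maxV s := by
      intro c hlt
      by_cases h1 : 1 ≤ c
      · have h2 : ¬ (maxV s ≤ valC s c) := by simpa using hmin c h1 hlt
        omega
      · have : valC s c = 0 := valC_out s c (by omega)
        omega
    have hstarQ : Qn s (cstar - rmax s cstar) (cstar + rmax s cstar) = true :=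
      Q_at_val s hdom cstar (by omega)
    have hfindA : (Aspec s).find? (fun y => decide (maxV s ≤ y.length)) = some (candC s cstar) := by
      rw [Aspec]
      apply find?_flatMap_range' _ _ 0 (s.length - 1) (cstar - rmax s cstar) _ (by omega) (by omega)
      · intro i hi0 hilt
        rw [List.find?_map, List.find?_filter]
        have hnone : (List.range' (i + 1) (s.length - (i + 1))).find?
            (fun a => decide ((fun j => Qn s i j) a = true ∧
              ((fun y => decide (maxV s ≤ y.length)) ∘ fun j => (s.drop i).take (j + 1 - i)) a = true)) = none := by
          rw [List.find?_eq_none]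
          intro j hj
          rw [List.mem_range'_1] at hj
          simp only [Function.comp, decide_eq_true_eq, not_and]
          intro hQ hlen
          have hjN : j < s.length := by omega
          rw [window_len s i j (by omega) hjN] at hlen
          obtain ⟨r, hr1, hjr, hcm, hval⟩ := val_ge_of_Q s hdom i j (by omega) hjN hQ
          have hub := maxV_bound s (i + r) hcm
          have hreq : r = rmax s cstar := by omega
          have := hminv (i + r) (by omega)
          omega
        rw [hnone]
        rfl
      · rw [List.find?_map, List.find?_filter]
        have hsome : (List.range' ((cstar - rmax s cstar) + 1) (s.length - ((cstar - rmax s cstar) + 1))).find?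
            (fun a => decide ((fun j => Qn s (cstar - rmax s cstar) j) a = true ∧
              ((fun y => decide (maxV s ≤ y.length)) ∘ fun j => (s.drop (cstar - rmax s cstar)).take (j + 1 - (cstar - rmax s cstar))) a = true)) =
            some (cstar + rmax s cstar) := by
          apply find?_range'_eq _ _ _ _ (by omega) (by omega)
          · intro j hj1 hj2
            simp only [Function.comp, decide_eq_true_eq]
            apply decide_eq_false
            rintro ⟨hQ, hlen⟩
            have hjN : j < s.length := by omega
            rw [window_len s (cstar - rmax s cstar) j (by omega) hjN] at hlen
            omega
          · simp only [Function.comp, decide_eq_true_eq]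
            refine ⟨hstarQ, ?_⟩
            rw [window_len s (cstar - rmax s cstar) (cstar + rmax s cstar) (by omega) (by omega)]
            omega
        rw [hsome]
        show some ((s.drop (cstar - rmax s cstar)).take ((cstar + rmax s cstar) + 1 - (cstar - rmax s cstar))) =
          some (candC s cstar)
        rw [candC, show (cstar + rmax s cstar) + 1 - (cstar - rmax s cstar) = 2 * rmax s cstar + 1 by omega]
    have hmemA : candC s cstar ∈ Aspec s := List.mem_of_find?_eq_some hfindA
    have hnonempty : (Aspec s).length > 0 := List.length_pos_of_mem hmemA
    rw [if_pos hnonempty, max?_eq_first (Aspec s) (maxV s) (candC s cstar) hbound hMpos hfindA,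
      tgt, if_neg hM, hfind]

lemma B_eq_tgt (n : String) :
    zerkala_alt n = String.ofList (tgt n.toList) := by
  simp only [zerkala_alt]
  set s := n.toList with hs
  congr 1
  rw [PySem.List.pyRange_one]
  rw [show (((s.length : Int) - 1) - 1).toNat = s.length - 2 from by omega]
  rw [List.foldl_map]
  have hstep : ∀ (acc : List Char), ∀ k ∈ List.range (s.length - 2),
      (fun (best : List Char) (c : Int) =>
        if PySem.Chars.isIn (PySem.Chars.lower [PySem.List.pyGetD s c ' ']) "02468acegikmo".toList then
          let r := zerkalaExpand s c.toNat 0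
          if 0 < r ∧ best.length < 2 * r + 1 then
            PySem.List.slice s (some (c - (r : Int))) (some (c + (r : Int) + 1))
          else best
        else best) acc (1 + (k : Int)) =
      (fun (best : List Char) (c : Nat) =>
        if best.length < valC s c then candC s c else best) acc (1 + k) := by
    intro acc k hk
    have hk' : k < s.length - 2 := List.mem_range.mp hk
    simp only []
    have hc1 : ((1:Int) + (k : Int)) = ((1 + k : Nat) : Int) := by push_cast; ring
    rw [hc1, PySem.List.pyGetD_natCast,
      show ((1 + k : Nat) : Int).toNat = 1 + k from by omega,
      show PySem.Chars.isIn (PySem.Chars.lower [s.getD (1 + k) ' ']) "02468acegikmo".toList =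
        evenMid (s.getD (1 + k) ' ') from rfl]
    have hrfl : rmax s (1 + k) = zerkalaExpand s (1 + k) 0 := rfl
    by_cases hev : evenMid (s.getD (1 + k) ' ') = true
    · rw [if_pos hev]
      by_cases hr : 0 < zerkalaExpand s (1 + k) 0
      · have hval : valC s (1 + k) = 2 * rmax s (1 + k) + 1 := by
          rw [valC, if_pos (by rw [hev]; simp; omega)]
        obtain ⟨_, hrc, hcr, _, _⟩ := val_pos_elim s (1 + k) (by omega)
        by_cases hlen : acc.length < 2 * zerkalaExpand s (1 + k) 0 + 1
        · rw [if_pos ⟨hr, hlen⟩, if_pos (by omega)]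
          have e1 : ((1 + k : Nat) : Int) - (zerkalaExpand s (1 + k) 0 : Int) =
              (((1 + k) - zerkalaExpand s (1 + k) 0 : Nat) : Int) := by omega
          have e2 : ((1 + k : Nat) : Int) + (zerkalaExpand s (1 + k) 0 : Int) + 1 =
              (((1 + k) + zerkalaExpand s (1 + k) 0 + 1 : Nat) : Int) := by push_cast; ring
          rw [e1, e2, PySem.List.slice_natCast, candC]
          congr 1
          omega
        · rw [if_neg (by rintro ⟨_, hbad⟩; exact hlen hbad), if_neg (by omega)]
      · have hval : valC s (1 + k) = 0 := by
          rw [valC, if_neg (by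
            intro hx
            simp only [Bool.and_eq_true, decide_eq_true_eq] at hx
            omega)]
        rw [if_neg (by rintro ⟨hbad, _⟩; exact hr hbad), if_neg (by omega)]
    · rw [if_neg hev]
      have hval : valC s (1 + k) = 0 := by
        rw [valC, if_neg (by
          intro hx
          simp only [Bool.and_eq_true, decide_eq_true_eq] at hx
          exact hev hx.1)]
      rw [if_neg (by omega)]
  rw [PySem.List.foldl_congr_mem _ _ _ _ hstep]
  have hctr : List.foldl (fun (best : List Char) (c : Nat) =>
      if best.length < valC s c then candC s c else best) [] (ctrs s) =
      List.foldl (fun (x : List Char) (y : Nat) =>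
        (fun (best : List Char) (c : Nat) => if best.length < valC s c then candC s c else best)
          x (1 + y)) [] (List.range (s.length - 2)) := by
    rw [ctrs, List.range'_eq_map_range, List.foldl_map]
  rw [← hctr]
  by_cases hM : maxV s = 0
  · rw [tgt, if_pos hM]
    exact pickG1 (valC s) (candC s) (fun y : List Char => y.length) (ctrs s) []
      (fun c hc => by have := maxV_bound s c hc; omega)
  · have hMpos : 0 < maxV s := Nat.pos_of_ne_zero hM
    have hex : ∃ c ∈ ctrs s, (fun c => decide (maxV s ≤ valC s c)) c = true := by
      rcases maxV_mem s with h0 | ⟨c, hc, hv⟩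
      · omega
      · exact ⟨c, hc, by simp [hv]⟩
    obtain ⟨cstar, hfind⟩ := Option.isSome_iff_exists.mp (List.find?_isSome.mpr hex)
    rw [tgt, if_neg hM, hfind]
    exact pickG2 (valC s) (candC s) (fun y : List Char => y.length) (maxV s) (ctrs s) [] cstar
      (fun c hc => maxV_bound s c hc)
      (fun c hc hv => by
        show (candC s c).length = valC s c
        obtain ⟨h1, h2, h3, hveq, _⟩ := val_pos_elim s c hv
        rw [candC, hveq]
        exact win_length s c (rmax s c) h2 (by omega))
      (by show ([] : List Char).length < maxV s; simpa using hMpos)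
      hfind

-- ===== VERDICT (by name: the statement is the Claim_ definition above) =====
theorem zerkala_spec : Claim_equal_zerkala := by
  intro n hdom _hpre
  unfold Spec_zerkala
  have hdom' : ∀ ch ∈ n.toList, pvDomChar ch = true := by
    intro ch hch
    have := hdom
    unfold Dom_zerkala pvDomStr at this
    exact List.all_eq_true.mp this ch hch
  rw [A_eq_tgt n hdom', B_eq_tgt n]
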